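-- pv_equiv track=rewrite | github.com/alecsandraiordache/BioInformatics | Project_L5/ex2/ex2.py | build_prefix_index
-- ===== SOURCE A (Python) =====
-- def build_prefix_index(reads: list, k: int) -> dict:
--     idx = {}
--     for i, s in enumerate(reads):
--         if len(s) >= k:
--             key = s[:k]
--             if key not in idx:
--                 idx[key] = []
--             idx[key].append(i)
--     return idx
-- ===== SOURCE B (Python) =====
-- def build_prefix_index(reads: list, k: int) -> dict:
--     pairs = [(s[:k], i) for i, s in enumerate(reads) if len(s) >= k]
--     keys = dict.fromkeys(p for p, _ in pairs)
--     return {key: [i for p, i in pairs if p == key] for key in keys}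
-- ===== Notes on version B (the rewrite author's own statement) =====
-- stated objective: alternative
-- what changed: Replaces the single pass that threads a mutable dict (membership test, list init, append per element) by a declarative decomposition: build the (prefix, index) pair list once, dedup the prefixes in first-occurrence order, and produce each group by filtering the pair list.
import Mathlib
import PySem

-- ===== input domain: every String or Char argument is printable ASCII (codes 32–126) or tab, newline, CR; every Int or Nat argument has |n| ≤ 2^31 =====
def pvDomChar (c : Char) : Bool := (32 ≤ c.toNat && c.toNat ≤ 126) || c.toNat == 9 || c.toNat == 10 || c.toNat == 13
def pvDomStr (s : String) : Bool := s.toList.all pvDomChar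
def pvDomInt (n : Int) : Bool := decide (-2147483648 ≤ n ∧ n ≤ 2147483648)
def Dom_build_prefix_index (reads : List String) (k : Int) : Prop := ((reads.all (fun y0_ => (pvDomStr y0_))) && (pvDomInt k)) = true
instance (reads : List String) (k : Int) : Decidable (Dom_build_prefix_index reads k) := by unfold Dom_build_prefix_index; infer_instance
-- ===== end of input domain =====

-- B groups by a different decomposition: build the (prefix, index) pairs once, take the distinct
-- prefixes in first-occurrence order, and collect each group by filtering the pair list — no
-- mutable dict is threaded through the loop. Alternative structure, not claimed faster.

-- ===== PORT A =====
-- literal transliteration of A's single pass: a dict accumulator, per element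
-- 'if key not in idx: idx[key] = []' then 'idx[key].append(i)'
def build_prefix_index (reads : List String) (k : Int) : List (String × List Int) :=
  let idx : PySem.Dict String (List Int) :=
    (PySem.List.enumerate reads 0).foldl
      (fun idx p =>
        if k ≤ PySem.Str.len p.2 then
          let key := PySem.Str.slice p.2 none (some k)
          let idx' := if idx.contains key then idx else idx.insert key ([] : List Int)
          idx'.modify key [] (fun v => v ++ [p.1])
        else idx)
      PySem.Dict.empty
  idx.items

-- ===== PORT B =====
def build_prefix_index_alt (reads : List String) (k : Int) : List (String × List Int) :=
  let pairs : List (String × Int) :=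
    ((PySem.List.enumerate reads 0).filter (fun p => decide (k ≤ PySem.Str.len p.2))).map
      (fun p => (PySem.Str.slice p.2 none (some k), p.1))
  let keys := PySem.List.dedup (pairs.map (fun q => q.1))
  keys.map (fun key => (key, (pairs.filter (fun q => q.1 == key)).map (fun q => q.2)))

-- ===== PRECONDITION & SPEC =====
def Spec_build_prefix_index (reads : List String) (k : Int) (out : List (String × List Int)) : Prop := out = build_prefix_index_alt reads k
instance (reads : List String) (k : Int) (out : List (String × List Int)) : Decidable (Spec_build_prefix_index reads k out) := by unfold Spec_build_prefix_index; infer_instance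

-- ===== CLAIM (what is proved, stated in full; the proofs are below) =====
def Claim_equal_build_prefix_index : Prop := ∀ (reads : List String) (k : Int), Dom_build_prefix_index reads k → Spec_build_prefix_index reads k (build_prefix_index reads k)

-- ===== LEMMAS AND PROOFS =====

-- A's 'ensure key present, then append' step is the same dict as a single modify with default [].
theorem step_eq (d : PySem.Dict String (List Int)) (key : String) (i : Int) :
    (if d.contains key then d else d.insert key ([] : List Int)).modify key [] (fun v => v ++ [i])
      = d.modify key [] (fun v => v ++ [i]) := by
  by_cases h : d.contains key
  · simp [h]
  · have h' : d.contains key = false := by simpa using h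
    simp [h', PySem.Dict.modify, PySem.Dict.getD_of_not_contains d _ h',
      PySem.Dict.getD_insert_self, PySem.Dict.insert_insert_self]

-- grouping a (key, value) pair list through the modify-append fold yields exactly B's
-- dedup-then-filter table
theorem group_fold (ps : List (String × Int)) :
    (ps.foldl (fun d (q : String × Int) => d.modify q.1 [] (fun v => v ++ [q.2]))
        PySem.Dict.empty).items
      = (PySem.List.dedup (ps.map (fun q => q.1))).map
          (fun key => (key, (ps.filter (fun q => q.1 == key)).map (fun q => q.2))) := by
  have hnd : (ps.foldl (fun d (q : String × Int) => d.modify q.1 [] (fun v => v ++ [q.2]))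
      PySem.Dict.empty).keys.Nodup :=
    PySem.Dict.nodup_keys_foldl_modify_key ps (fun q => q.1) []
      (fun _ q v => v ++ [q.2]) PySem.Dict.empty (by simp)
  rw [PySem.Dict.items_eq_map_keys _ hnd []]
  rw [PySem.Dict.keys_foldl_modify_key ps (fun q => q.1) [] (fun _ q v => v ++ [q.2])]
  have hkeys : PySem.Set.update (PySem.Dict.empty : PySem.Dict String (List Int)).keys
      (ps.map (fun q => q.1)) = PySem.List.dedup (ps.map (fun q => q.1)) := by
    simp [PySem.Set.update, PySem.List.dedup_eq_ofList, PySem.Set.ofList_eq_foldl]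
  rw [hkeys]
  refine List.map_congr_left ?_
  intro key _
  rw [PySem.Dict.getD_foldl_modify_append]
  simp

theorem build_prefix_index_eq_alt (reads : List String) (k : Int) :
    build_prefix_index reads k = build_prefix_index_alt reads k := by
  unfold build_prefix_index build_prefix_index_alt
  rw [PySem.List.foldl_congr_mem _ _
        (fun idx p =>
          if k ≤ PySem.Str.len p.2 then
            idx.modify (PySem.Str.slice p.2 none (some k)) [] (fun v => v ++ [p.1])
          else idx)
        _ (by intro acc x _; by_cases h : k ≤ PySem.Str.len x.2 <;> simp [step_eq])]
  rw [PySem.List.foldl_ite_eq_foldl_filter (fun (p : Int × String) => k ≤ PySem.Str.len p.2)]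
  have h3 : ((PySem.List.enumerate reads 0).filter
        (fun p => decide (k ≤ PySem.Str.len p.2))).foldl
        (fun idx p => idx.modify (PySem.Str.slice p.2 none (some k)) [] (fun v => v ++ [p.1]))
        PySem.Dict.empty
      = (((PySem.List.enumerate reads 0).filter
          (fun p => decide (k ≤ PySem.Str.len p.2))).map
          (fun p => (PySem.Str.slice p.2 none (some k), p.1))).foldl
        (fun d (q : String × Int) => d.modify q.1 [] (fun v => v ++ [q.2]))
        PySem.Dict.empty := by
    rw [List.foldl_map]
  rw [h3, group_fold]

-- ===== VERDICT (by name: the statement is the Claim_ definition above) =====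
theorem build_prefix_index_spec : Claim_equal_build_prefix_index := by
  intro reads k _
  unfold Spec_build_prefix_index
  exact build_prefix_index_eq_alt reads k
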